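-- pv_equiv track=rewrite | github.com/EffectiveAgileDev/RAG_Scraper | src/file_generator/text_file_generator.py | _format_menu_items
-- ===== SOURCE A (Python) =====
-- from typing import List, Optional
--
-- def _format_menu_items(menu_items: dict) -> List[str]:
--     """Format menu items for RAG output.
--
--     Args:
--         menu_items: Dictionary of menu sections and items
--
--     Returns:
--         List of formatted menu lines
--     """
--     menu_lines = []
--
--     # Define section order and formatting
--     section_map = {
--         'appetizers': 'APPETIZERS',
--         'entrees': 'ENTREES',
--         'mains': 'ENTREES',
--         'main_courses': 'ENTREES',
--         'desserts': 'DESSERTS',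
--         'drinks': 'DRINKS',
--         'beverages': 'DRINKS'
--     }
--
--     # Process known sections in order
--     for section_key in ['appetizers', 'entrees', 'mains', 'main_courses', 'desserts', 'drinks', 'beverages']:
--         if section_key in menu_items and menu_items[section_key]:
--             section_name = section_map[section_key]
--             items = menu_items[section_key]
--             if isinstance(items, list):
--                 items_str = ", ".join(items)
--                 menu_lines.append(f"{section_name}: {items_str}")
--
--     # Process any other sections not in the standard map
--     for section_key, items in menu_items.items():
--         if section_key not in section_map and items:
--             section_name = section_key.upper().replace('_', ' ')
--             if isinstance(items, list):
--                 items_str = ", ".join(items)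
--                 menu_lines.append(f"{section_name}: {items_str}")
--
--     return menu_lines
-- ===== SOURCE B (Python) =====
-- def _format_menu_items(menu_items: dict):
--     """Format menu items by decorate-sort-emit: tag each emitted entry with a
--     numeric rank (known sections get their fixed-order index, other sections get
--     an offset insertion position), sort once by rank, then format."""
--     known = ['appetizers', 'entrees', 'mains', 'main_courses', 'desserts', 'drinks', 'beverages']
--     labels = {
--         'appetizers': 'APPETIZERS',
--         'entrees': 'ENTREES',
--         'mains': 'ENTREES',
--         'main_courses': 'ENTREES',
--         'desserts': 'DESSERTS',
--         'drinks': 'DRINKS',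
--         'beverages': 'DRINKS'
--     }
--     decorated = []
--     for pos, (key, items) in enumerate(menu_items.items()):
--         if items and isinstance(items, list):
--             if key in known:
--                 decorated.append((known.index(key), labels[key], items))
--             else:
--                 decorated.append((len(known) + pos, key.upper().replace('_', ' '), items))
--     decorated = sorted(decorated, key=lambda t: t[0])
--     return [f"{name}: {', '.join(items)}" for _, name, items in decorated]
-- ===== Notes on version B (the rewrite author's own statement) =====
-- stated objective: alternative
-- what changed: Replaces A's two differently-shaped emitting loops (fixed known-key order pass, then a dict-items pass) by decorate-sort-emit: one pass tags every emitted section with a numeric rank (known sections their fixed-order index, other sections an offset insertion position), one stable sort by rank, then one uniform formatting pass.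
import Mathlib
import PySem

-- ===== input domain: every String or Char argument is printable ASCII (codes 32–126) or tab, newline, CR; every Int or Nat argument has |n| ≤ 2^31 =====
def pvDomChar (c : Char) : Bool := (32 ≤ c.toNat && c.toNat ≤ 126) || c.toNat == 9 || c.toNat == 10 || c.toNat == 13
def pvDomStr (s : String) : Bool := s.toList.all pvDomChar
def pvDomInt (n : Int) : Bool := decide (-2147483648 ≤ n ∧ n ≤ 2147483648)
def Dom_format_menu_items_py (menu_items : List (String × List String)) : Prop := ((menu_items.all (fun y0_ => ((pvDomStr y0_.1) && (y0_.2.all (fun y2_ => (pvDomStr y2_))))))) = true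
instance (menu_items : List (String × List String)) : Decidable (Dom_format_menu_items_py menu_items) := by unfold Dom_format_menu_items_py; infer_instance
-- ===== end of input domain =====

-- B is a decorate-sort-emit rewrite: one pass tags each emitted section with a numeric
-- rank (known sections their fixed-order index, others an offset insertion position),
-- one sort by rank, one formatting pass; A emits with two differently-shaped loops.
-- Same return value; objective "alternative".

-- section_map of A's source (B's 'labels' dict is the identical literal)
def pvSecMap : PySem.Dict String String := PySem.Dict.mk
  [("appetizers","APPETIZERS"),("entrees","ENTREES"),("mains","ENTREES"),
   ("main_courses","ENTREES"),("desserts","DESSERTS"),("drinks","DRINKS"),("beverages","DRINKS")]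

def pvKnownOrder : List String :=
  ["appetizers","entrees","mains","main_courses","desserts","drinks","beverages"]

-- f"{section_name}: {items_str}" with items_str = ", ".join(items)
def pvFmt (name : String) (items : List String) : String :=
  name ++ ": " ++ PySem.Str.join ", " items

-- ===== PORT A =====
def format_menu_items_py (menu_items : List (String × List String)) : List String :=
  let d := PySem.Dict.ofList menu_items
  -- first loop: known sections in order ('section_key in menu_items and menu_items[section_key]')
  let l1 := pvKnownOrder.foldl (fun acc k =>
      if d.contains k && !(d.getD k []).isEmpty then
        acc ++ [pvFmt (pvSecMap.getD k "") (d.getD k [])]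
      else acc) []
  -- second loop: 'for section_key, items in menu_items.items()'
  d.items.foldl (fun acc p =>
      if !pvSecMap.contains p.1 && !p.2.isEmpty then
        acc ++ [pvFmt (PySem.Str.replace (PySem.Str.upper p.1) "_" " ") p.2]
      else acc) l1

-- ===== PORT B =====
-- (B's 'labels' dict is the identical literal to A's section_map; pvSecMap serves both ports)

def format_menu_items_py_alt (menu_items : List (String × List String)) : List String :=
  let d := PySem.Dict.ofList menu_items
  -- decorate: 'for pos, (key, items) in enumerate(menu_items.items())'
  let decorated := (PySem.List.enumerate d.items 0).foldl
    (fun acc p =>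
      if !p.2.2.isEmpty then
        if pvKnownOrder.contains p.2.1 then
          acc ++ [((((PySem.List.index? pvKnownOrder p.2.1).getD 0 : Nat) : Int),
                   pvSecMap.getD p.2.1 "", p.2.2)]
        else
          acc ++ [(PySem.List.len pvKnownOrder + p.1,
                   PySem.Str.replace (PySem.Str.upper p.2.1) "_" " ", p.2.2)]
      else acc) ([] : List (Int × String × List String))
  -- sort by rank, then emit
  (PySem.List.sorted decorated (fun t => t.1) false).map (fun t => pvFmt t.2.1 t.2.2)

-- ===== PRECONDITION & SPEC =====
def Spec_format_menu_items_py (menu_items : List (String × List String)) (out : List String) : Prop := out = format_menu_items_py_alt menu_items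
instance (menu_items : List (String × List String)) (out : List String) : Decidable (Spec_format_menu_items_py menu_items out) := by unfold Spec_format_menu_items_py; infer_instance

-- ===== CLAIM (what is proved, stated in full; the proofs are below) =====
def Claim_equal_format_menu_items_py : Prop := ∀ (menu_items : List (String × List String)), Dom_format_menu_items_py menu_items → Spec_format_menu_items_py menu_items (format_menu_items_py menu_items)

-- ===== LEMMAS AND PROOFS =====

-- abbreviations for the proofs (proof-side only)
def pvIdx (k : String) : Int := (((PySem.List.index? pvKnownOrder k).getD 0 : Nat) : Int)
def pvUp (k : String) : String := PySem.Str.replace (PySem.Str.upper k) "_" " "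
def pvG2 (p : Int × String × List String) : Int × String × List String :=
  (PySem.List.len pvKnownOrder + p.1, pvUp p.2.1, p.2.2)

-- the sorted decorated list, named: known part (in fixed order) ++ unknown part (in dict order)
def pvTarget (d : PySem.Dict String (List String)) : List (Int × String × List String) :=
  (pvKnownOrder.filter (fun k => !(d.getD k []).isEmpty)).map
      (fun k => (pvIdx k, pvSecMap.getD k "", d.getD k []))
  ++ ((PySem.List.enumerate d.items 0).filter
        (fun p => !p.2.2.isEmpty && !pvKnownOrder.contains p.2.1)).map pvG2

lemma secMap_contains_eq (k : String) :
    pvSecMap.contains k = pvKnownOrder.contains k := by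
  simp only [pvSecMap, pvKnownOrder, PySem.Dict.contains, List.contains_eq_any_beq]
  simp [BEq.comm]

-- generic loop shapes used to reshape B's decorate pass
lemma filter_map_snd {α β γ : Type} (l : List (α × β)) (c : β → Bool) (g : β → γ) :
    (l.filter (fun x => c x.2)).map (fun x => g x.2)
      = ((l.map (fun x => x.2)).filter c).map g := by
  induction l with
  | nil => rfl
  | cons a t ih => by_cases h : c a.2 <;> simp [h, ih]

lemma map_filter_map {α β γ : Type} (l : List α) (f : α → β) (c : β → Bool) (g : β → γ) :
    ((l.map f).filter c).map g
      = (l.filter (fun x => c (f x))).map (fun x => g (f x)) := by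
  induction l with
  | nil => rfl
  | cons a t ih => by_cases h : c (f a) <;> simp [h, ih]

-- generic: a two-branch conditional flatMap is a permutation of its two filtered map parts
lemma flatMap_two_branch_perm {α β : Type} (l : List α) (c q : α → Bool) (g1 g2 : α → β) :
    (l.flatMap (fun p => if c p then (if q p then [g1 p] else [g2 p]) else [])).Perm
      ((l.filter (fun p => c p && q p)).map g1 ++ (l.filter (fun p => c p && !q p)).map g2) := by
  induction l with
  | nil => simp
  | cons a t ih =>
    by_cases hc : c a = true
    · by_cases hq : q a = true
      · simpa [hc, hq] using ih.cons (g1 a)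
      · simp only [List.flatMap_cons, List.filter_cons, hc, hq, Bool.and_true, Bool.and_false,
          Bool.not_false, Bool.false_eq_true, if_false, if_true, List.map_cons,
          List.singleton_append]
        exact (ih.cons (g2 a)).trans List.perm_middle.symm
    · simpa [hc] using ih

-- decorated (B's first pass) as a flatMap
lemma decorated_eq_flatMap (d : PySem.Dict String (List String)) :
    (PySem.List.enumerate d.items 0).foldl
      (fun acc p =>
        if !p.2.2.isEmpty then
          if pvKnownOrder.contains p.2.1 then
            acc ++ [((((PySem.List.index? pvKnownOrder p.2.1).getD 0 : Nat) : Int),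
                     pvSecMap.getD p.2.1 "", p.2.2)]
          else
            acc ++ [(PySem.List.len pvKnownOrder + p.1,
                     PySem.Str.replace (PySem.Str.upper p.2.1) "_" " ", p.2.2)]
        else acc) ([] : List (Int × String × List String))
    = (PySem.List.enumerate d.items 0).flatMap (fun p =>
        if !p.2.2.isEmpty then
          (if pvKnownOrder.contains p.2.1 then
            [(pvIdx p.2.1, pvSecMap.getD p.2.1 "", p.2.2)]
          else [pvG2 p])
        else []) := by
  have h : ∀ (l : List (Int × String × List String)) (acc : List (Int × String × List String)),
      l.foldl
      (fun acc p =>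
        if !p.2.2.isEmpty then
          if pvKnownOrder.contains p.2.1 then
            acc ++ [((((PySem.List.index? pvKnownOrder p.2.1).getD 0 : Nat) : Int),
                     pvSecMap.getD p.2.1 "", p.2.2)]
          else
            acc ++ [(PySem.List.len pvKnownOrder + p.1,
                     PySem.Str.replace (PySem.Str.upper p.2.1) "_" " ", p.2.2)]
        else acc) acc
      = acc ++ l.flatMap (fun p =>
        if !p.2.2.isEmpty then
          (if pvKnownOrder.contains p.2.1 then
            [(pvIdx p.2.1, pvSecMap.getD p.2.1 "", p.2.2)]
          else [pvG2 p])
        else []) := by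
    intro l
    induction l with
    | nil => intro acc; simp
    | cons a t ih =>
      intro acc
      simp only [List.foldl_cons, List.flatMap_cons]
      split_ifs with h1 h2
      · rw [ih, List.append_assoc]; rfl
      · rw [ih, List.append_assoc]; rfl
      · rw [ih]; rfl
  simpa using h _ []

-- a truthy value means the key is one of the dict's keys
lemma mem_keys_of_truthy (d : PySem.Dict String (List String)) (k : String)
    (h : (d.getD k []).isEmpty = false) : k ∈ d.keys := by
  by_contra hk
  have hc : d.contains k = false := by
    cases hcc : d.contains k
    · rfl
    · exact absurd ((PySem.Dict.contains_iff_mem_keys _ _).mp hcc) hk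
  rw [PySem.Dict.getD_of_not_contains _ _ hc] at h
  simp at h

-- the known part of the decorated entries, re-indexed by the fixed order (a permutation)
lemma known_entries_perm (d : PySem.Dict String (List String)) (hnd : d.keys.Nodup) :
    (((PySem.List.enumerate d.items 0).filter
        (fun p => !p.2.2.isEmpty && pvKnownOrder.contains p.2.1)).map
      (fun p => (pvIdx p.2.1, pvSecMap.getD p.2.1 "", p.2.2))).Perm
    ((pvKnownOrder.filter (fun k => !(d.getD k []).isEmpty)).map
      (fun k => (pvIdx k, pvSecMap.getD k "", d.getD k []))) := by
  -- drop the enumerate index: condition and value depend only on the (key, items) pair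
  have h1 : ((PySem.List.enumerate d.items 0).filter
        (fun p => !p.2.2.isEmpty && pvKnownOrder.contains p.2.1)).map
      (fun p => (pvIdx p.2.1, pvSecMap.getD p.2.1 "", p.2.2))
      = (d.items.filter (fun kv => !kv.2.isEmpty && pvKnownOrder.contains kv.1)).map
          (fun kv => (pvIdx kv.1, pvSecMap.getD kv.1 "", kv.2)) := by
    have h := filter_map_snd (PySem.List.enumerate d.items 0)
      (fun kv : String × List String => !kv.2.isEmpty && pvKnownOrder.contains kv.1)
      (fun kv : String × List String => (pvIdx kv.1, pvSecMap.getD kv.1 "", kv.2))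
    rw [PySem.List.map_snd_enumerate] at h
    exact h
  rw [h1, PySem.Dict.items_eq_map_keys d hnd []]
  have h2 : (((d.keys.map (fun k => (k, d.getD k []))).filter
        (fun kv => !kv.2.isEmpty && pvKnownOrder.contains kv.1)).map
        (fun kv => (pvIdx kv.1, pvSecMap.getD kv.1 "", kv.2)))
      = (d.keys.filter (fun k => !(d.getD k []).isEmpty && pvKnownOrder.contains k)).map
          (fun k => (pvIdx k, pvSecMap.getD k "", d.getD k [])) :=
    map_filter_map d.keys (fun k => (k, d.getD k []))
      (fun kv => !kv.2.isEmpty && pvKnownOrder.contains kv.1)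
      (fun kv => (pvIdx kv.1, pvSecMap.getD kv.1 "", kv.2))
  rw [h2]
  -- both sides map the same function over two key lists; those lists are a Perm
  apply List.Perm.map
  have hnl : (d.keys.filter (fun k =>
      !(d.getD k []).isEmpty && pvKnownOrder.contains k)).Nodup := hnd.filter _
  have hnr : (pvKnownOrder.filter (fun k => !(d.getD k []).isEmpty)).Nodup :=
    (by decide : pvKnownOrder.Nodup).filter _
  rw [List.perm_ext_iff_of_nodup hnl hnr]
  intro k
  simp only [List.mem_filter, Bool.and_eq_true, Bool.not_eq_true']
  constructor
  · rintro ⟨_, ht, hk⟩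
    exact ⟨by simpa [pvKnownOrder] using hk, ht⟩
  · rintro ⟨hk, ht⟩
    exact ⟨mem_keys_of_truthy d k ht, ht, by simpa [pvKnownOrder] using hk⟩

-- pvTarget is a permutation of the decorated list
lemma target_perm_decorated (d : PySem.Dict String (List String)) (hnd : d.keys.Nodup) :
    (pvTarget d).Perm
      ((PySem.List.enumerate d.items 0).flatMap (fun p =>
        if !p.2.2.isEmpty then
          (if pvKnownOrder.contains p.2.1 then
            [(pvIdx p.2.1, pvSecMap.getD p.2.1 "", p.2.2)]
          else [pvG2 p])
        else [])) := by
  unfold pvTarget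
  have h2 := flatMap_two_branch_perm (PySem.List.enumerate d.items 0)
    (fun p => !p.2.2.isEmpty) (fun p => pvKnownOrder.contains p.2.1)
    (fun p => (pvIdx p.2.1, pvSecMap.getD p.2.1 "", p.2.2)) pvG2
  exact (((known_entries_perm d hnd).symm.append_right _).trans h2.symm)

-- pvTarget is strictly increasing in the rank component
lemma target_pairwise (d : PySem.Dict String (List String)) :
    (pvTarget d).Pairwise (fun a b => a.1 < b.1) := by
  have hlen : PySem.List.len pvKnownOrder = 7 := by decide
  unfold pvTarget
  rw [List.pairwise_append]
  refine ⟨?_, ?_, ?_⟩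
  · rw [List.pairwise_map]
    exact ((by decide : pvKnownOrder.Pairwise (fun a b => pvIdx a < pvIdx b)).filter _)
  · rw [List.pairwise_map]
    refine (List.Pairwise.sublist List.filter_sublist
      (PySem.List.pairwise_lt_enumerate d.items 0)).imp ?_
    intro h
    simp only [pvG2, hlen]
    omega
  · intro a ha b hb
    simp only [List.mem_map] at ha hb
    obtain ⟨k, hk, rfl⟩ := ha
    obtain ⟨p, hp, rfl⟩ := hb
    have hka : pvIdx k < 7 := by
      have hkm := (List.mem_filter.mp hk).1
      fin_cases hkm <;> decide
    have hpb : (0 : Int) ≤ p.1 := by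
      have hpm := List.mem_of_mem_filter hp
      obtain ⟨j, hj, rfl⟩ := (PySem.List.mem_enumerate_iff d.items 0 p).mp hpm
      omega
    simp only [pvG2, hlen]
    omega

-- A's first loop equals the formatted known part of pvTarget
lemma known_part_eq (d : PySem.Dict String (List String)) :
    pvKnownOrder.foldl (fun acc k =>
      if d.contains k && !(d.getD k []).isEmpty then
        acc ++ [pvFmt (pvSecMap.getD k "") (d.getD k [])]
      else acc) []
    = ((pvKnownOrder.filter (fun k => !(d.getD k []).isEmpty)).map
        (fun k => (pvIdx k, pvSecMap.getD k "", d.getD k []))).map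
        (fun t => pvFmt t.2.1 t.2.2) := by
  rw [PySem.List.foldl_congr_mem pvKnownOrder _ (fun acc k =>
        if !(d.getD k []).isEmpty then
          acc ++ [pvFmt (pvSecMap.getD k "") (d.getD k [])] else acc) []
      (by
        intro acc k hk
        by_cases hc : d.contains k = true
        · simp [hc]
        · have h0 : d.getD k [] = [] := PySem.Dict.getD_of_not_contains d [] (by simpa using hc)
          simp [hc, h0])]
  rw [PySem.List.foldl_append_if, List.map_map]
  simp only [List.nil_append]
  apply List.map_congr_left
  intro k hk
  have hmem := (List.mem_filter.mp hk).1
  fin_cases hmem <;> rfl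

-- A's second loop equals the formatted unknown part of pvTarget (appended to acc)
lemma unknown_part_eq (d : PySem.Dict String (List String)) (acc : List String) :
    d.items.foldl (fun acc p =>
      if !pvSecMap.contains p.1 && !p.2.isEmpty then
        acc ++ [pvFmt (PySem.Str.replace (PySem.Str.upper p.1) "_" " ") p.2]
      else acc) acc
    = acc ++ (((PySem.List.enumerate d.items 0).filter
        (fun p => !p.2.2.isEmpty && !pvKnownOrder.contains p.2.1)).map pvG2).map
        (fun t => pvFmt t.2.1 t.2.2) := by
  rw [PySem.List.foldl_append_if]
  congr 1
  -- drop the enumerate index and the rank on the right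
  have h1 : (((PySem.List.enumerate d.items 0).filter
        (fun p => !p.2.2.isEmpty && !pvKnownOrder.contains p.2.1)).map pvG2).map
        (fun t => pvFmt t.2.1 t.2.2)
      = (d.items.filter (fun kv => !kv.2.isEmpty && !pvKnownOrder.contains kv.1)).map
          (fun kv => pvFmt (pvUp kv.1) kv.2) := by
    have h : ∀ (l : List (Int × String × List String)),
        ((l.filter (fun p => !p.2.2.isEmpty && !pvKnownOrder.contains p.2.1)).map pvG2).map
          (fun t => pvFmt t.2.1 t.2.2)
        = ((l.map (fun x => x.2)).filter
            (fun kv => !kv.2.isEmpty && !pvKnownOrder.contains kv.1)).map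
            (fun kv => pvFmt (pvUp kv.1) kv.2) := by
      intro l
      induction l with
      | nil => rfl
      | cons a t ih =>
        by_cases hP : (!a.2.2.isEmpty && !pvKnownOrder.contains a.2.1) = true
        · simp only [List.filter_cons, List.map_cons, hP, if_true, ih, pvG2]
        · simp only [List.filter_cons, List.map_cons, hP, if_false, ih,
            Bool.false_eq_true]
    have h2 := h (PySem.List.enumerate d.items 0)
    rw [PySem.List.map_snd_enumerate] at h2
    exact h2
  rw [h1]
  have hf : d.items.filter (fun p => !pvSecMap.contains p.1 && !p.2.isEmpty)
      = d.items.filter (fun kv => !kv.2.isEmpty && !pvKnownOrder.contains kv.1) := by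
    apply List.filter_congr
    intro kv _
    rw [secMap_contains_eq, Bool.and_comm]
  rw [hf]
  rfl

-- ===== VERDICT (by name: the statement is the Claim_ definition above) =====
theorem format_menu_items_py_spec : Claim_equal_format_menu_items_py := by
  intro mi _
  unfold Spec_format_menu_items_py format_menu_items_py format_menu_items_py_alt
  have hnd := PySem.Dict.nodup_keys_ofList mi
  set d := PySem.Dict.ofList mi with hd
  simp only []
  rw [decorated_eq_flatMap d]
  rw [PySem.List.sorted_eq_of_perm_of_pairwise_lt _ _ _
        (target_perm_decorated d hnd) (target_pairwise d)]
  unfold pvTarget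
  rw [List.map_append, unknown_part_eq d, known_part_eq d]
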